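-- pv_equiv track=rewrite | github.com/PrimadonnaGit/codingTestPractice | 이것이 코딩테스트다/그리디/01.모험가 길드.py | solution
-- ===== SOURCE A (Python) =====
-- def solution(n, fear):
--     # 공포도가 낮은 순서대로 그룹에 포함
--     fear.sort()
--     # 공포도가 오름차순으로 정렬되어 있기 때문에 현재 모험가의 공포도만 조사하면 최소한의 인원으로 그룹을 만들 수 있다.
--     # 따라서, 최대한의 그룹을 만들 수 있다.
--
--     group_count = 0
--     group_member = 0
--     for i in fear:
--         group_member += 1
--         if group_member >= i:  # 그룹에 포함된 멤버의 수가 들어오려는 멤버의 공포도 보다 높거나 같다면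
--             group_count += 1
--             group_member = 0  # 그룹 초기화
--
--     return group_count  # [1], [2,2], 2,3
-- ===== SOURCE B (Python) =====
-- def solution(n, fear):
--     # Count each fear value once, then run the greedy group formation
--     # arithmetically per distinct value (carry = members of the open group).
--     counts = {}
--     for v in fear:
--         counts[v] = counts.get(v, 0) + 1
--     groups = 0
--     carry = 0
--     for v in sorted(counts):
--         c = counts[v]
--         if v <= 1:
--             # every adventurer immediately closes a group
--             groups += c
--             carry = 0
--         else:
--             total = carry + c
--             groups += total // v
--             carry = total % v
--     return groups
-- ===== Notes on version B (the rewrite author's own statement) =====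
-- stated objective: alternative
-- what changed: B replaces A's sort of all n adventurers followed by an element-by-element greedy scan with a counting dict over the distinct fear values: it sorts only the distinct values and closes groups arithmetically per value via quotient/remainder.
import Mathlib
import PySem

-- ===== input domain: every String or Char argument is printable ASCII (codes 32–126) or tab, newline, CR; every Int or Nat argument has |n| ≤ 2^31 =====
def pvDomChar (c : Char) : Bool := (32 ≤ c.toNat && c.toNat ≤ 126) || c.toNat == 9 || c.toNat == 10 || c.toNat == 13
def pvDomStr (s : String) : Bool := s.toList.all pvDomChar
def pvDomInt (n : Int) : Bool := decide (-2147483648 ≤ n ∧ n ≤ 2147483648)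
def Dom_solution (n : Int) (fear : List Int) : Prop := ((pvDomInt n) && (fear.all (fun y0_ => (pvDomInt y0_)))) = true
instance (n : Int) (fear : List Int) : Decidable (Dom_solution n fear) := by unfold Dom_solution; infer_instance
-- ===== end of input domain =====

-- B changes the algorithm: a counting dict over distinct fear values and one arithmetic
-- (quotient/remainder) greedy step per value, instead of sorting all n adventurers.
-- A sorts `fear` in place (observable mutation); the equivalence proved here is about the return value only.

-- ===== PORT A =====
-- one iteration of A's for-loop: state = (group_count, group_member)
def solutionStep (s : Int × Int) (i : Int) : Int × Int :=
  if s.2 + 1 ≥ i then (s.1 + 1, 0) else (s.1, s.2 + 1)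

def solution (n : Int) (fear : List Int) : Int :=
  ((PySem.List.sorted fear (fun x => x) false).foldl solutionStep (0, 0)).1

-- ===== PORT B =====
-- one iteration of B's for-loop over the sorted distinct values: state = (groups, carry)
def solutionAltStep (counts : PySem.Dict Int Int) (s : Int × Int) (v : Int) : Int × Int :=
  let c := counts.getD v 0
  if v ≤ 1 then (s.1 + c, 0)
  else (s.1 + PySem.Int.floordiv (s.2 + c) v, PySem.Int.mod (s.2 + c) v)

def solution_alt (n : Int) (fear : List Int) : Int :=
  let counts := fear.foldl (fun d v => d.insert v (d.getD v 0 + 1)) PySem.Dict.empty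
  ((PySem.List.sorted counts.keys (fun x => x) false).foldl (solutionAltStep counts) (0, 0)).1

-- ===== PRECONDITION & SPEC =====
def Spec_solution (n : Int) (fear : List Int) (out : Int) : Prop := out = solution_alt n fear
instance (n : Int) (fear : List Int) (out : Int) : Decidable (Spec_solution n fear out) := by unfold Spec_solution; infer_instance

-- ===== CLAIM (what is proved, stated in full; the proofs are below) =====
def Claim_equal_solution : Prop := ∀ (n : Int) (fear : List Int), Dom_solution n fear → Spec_solution n fear (solution n fear)

-- ===== LEMMAS AND PROOFS =====

-- A's greedy over a block of c equal values v ≤ 1, starting with an empty open group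
lemma chunk_low0 (v : Int) (hv : v ≤ 1) (c : Nat) (g : Int) :
    (List.replicate c v).foldl solutionStep (g, 0) = (g + c, 0) := by
  induction c generalizing g with
  | zero => simp
  | succ k ih =>
      have : solutionStep (g, 0) v = (g + 1, 0) := by
        simp [solutionStep]; omega
      rw [List.replicate_succ, List.foldl_cons, this, ih]
      simp only [Prod.mk.injEq]; constructor <;> push_cast <;> ring

-- same, from an arbitrary nonnegative carry, c ≥ 1
lemma chunk_low (v : Int) (hv : v ≤ 1) (c : Nat) (hc : 1 ≤ c) (g m : Int) (hm : 0 ≤ m) :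
    (List.replicate c v).foldl solutionStep (g, m) = (g + c, 0) := by
  obtain ⟨k, rfl⟩ : ∃ k, c = k + 1 := ⟨c - 1, by omega⟩
  have : solutionStep (g, m) v = (g + 1, 0) := by
    simp [solutionStep]; omega
  rw [List.replicate_succ, List.foldl_cons, this, chunk_low0 v hv]
  simp only [Prod.mk.injEq]; constructor <;> push_cast <;> ring

-- A's greedy over a block of c equal values v > 1: quotient/remainder closed form
lemma chunk_high (v : Int) (hv : 1 < v) (c : Nat) (g m : Int) (hm0 : 0 ≤ m) (hmv : m < v) :
    (List.replicate c v).foldl solutionStep (g, m) = (g + (m + c) / v, (m + c) % v) := by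
  induction c generalizing g m with
  | zero =>
      simp [Int.ediv_eq_zero_of_lt hm0 (by simpa using hmv), Int.emod_eq_of_lt hm0 (by simpa using hmv)]
  | succ k ih =>
      rw [List.replicate_succ, List.foldl_cons]
      by_cases h : m + 1 ≥ v
      · have hm' : m = v - 1 := by omega
        have hstep : solutionStep (g, m) v = (g + 1, 0) := by simp [solutionStep]; omega
        rw [hstep, ih (g + 1) 0 le_rfl (by omega)]
        have h1 : m + (k + 1 : Nat) = (k : Int) + 1 * v := by push_cast; omega
        rw [h1, Int.add_mul_ediv_right _ _ (by omega), Int.add_mul_emod_self_right]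
        simp only [Prod.mk.injEq]; constructor <;> push_cast <;> ring
      · have hstep : solutionStep (g, m) v = (g, m + 1) := by simp [solutionStep]; omega
        rw [hstep, ih g (m + 1) (by omega) (by omega)]
        have h2 : m + ((k + 1 : Nat) : Int) = m + 1 + k := by push_cast; ring
        rw [h2]

-- the elements of the flattened blocks
lemma mem_flatMap_replicate (f : Int → Nat) (ks : List Int) (x : Int) :
    x ∈ ks.flatMap (fun v => List.replicate (f v) v) → x ∈ ks := by
  intro h
  obtain ⟨v, hv, hx⟩ := List.mem_flatMap.1 h
  rwa [List.eq_of_mem_replicate hx]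

-- main invariant: A's element-wise greedy over the blocks equals B's per-value fold
lemma main_fold (fear : List Int) (ks : List Int) :
    ∀ (g m : Int), 0 ≤ m → ks.Pairwise (· < ·) →
    (∀ v ∈ ks, m < v ∨ v ≤ 1) → (∀ v ∈ ks, 1 ≤ fear.count v) →
    (ks.flatMap (fun v => List.replicate (fear.count v) v)).foldl solutionStep (g, m)
      = ks.foldl (solutionAltStep (PySem.Dict.counter fear)) (g, m) := by
  induction ks with
  | nil => intro g m _ _ _ _; simp
  | cons v t ih =>
      intro g m hm hp hinv hcnt
      rw [List.flatMap_cons, List.foldl_append, List.foldl_cons]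
      have hc : 1 ≤ fear.count v := hcnt v (by simp)
      have hgetD : (PySem.Dict.counter fear).getD v 0 = (fear.count v : Int) :=
        PySem.Dict.getD_counter fear v
      have hpt : t.Pairwise (· < ·) := hp.of_cons
      have hlt : ∀ w ∈ t, v < w := fun w hw => List.rel_of_pairwise_cons hp hw
      by_cases hv : v ≤ 1
      · rw [chunk_low v hv _ hc g m hm]
        have hstep : solutionAltStep (PySem.Dict.counter fear) (g, m) v = (g + fear.count v, 0) := by
          simp [solutionAltStep, hgetD, hv]
        rw [hstep, ih (g + fear.count v) 0 le_rfl hpt (fun w _ => by omega)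
            (fun w hw => hcnt w (by simp [hw]))]
      · have hv' : 1 < v := by omega
        have hmv : m < v := by rcases hinv v (by simp) with h | h; exact h; omega
        rw [chunk_high v hv' _ g m hm hmv]
        have hstep : solutionAltStep (PySem.Dict.counter fear) (g, m) v
            = (g + (m + fear.count v) / v, (m + fear.count v) % v) := by
          simp only [solutionAltStep, hgetD]
          rw [if_neg (by omega), PySem.Int.floordiv_eq_ediv_of_pos (by omega),
              PySem.Int.mod_eq_emod_of_pos (by omega)]
        rw [hstep]
        have hm0' : 0 ≤ (m + fear.count v) % v := Int.emod_nonneg _ (by omega)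
        have hmv' : (m + fear.count v) % v < v := Int.emod_lt_of_pos _ (by omega)
        exact ih _ _ hm0' hpt
          (fun w hw => Or.inl (lt_of_lt_of_le hmv' (le_of_lt (hlt w hw))))
          (fun w hw => hcnt w (by simp [hw]))

-- counts of the flattened blocks
lemma count_flatMap_replicate (fear : List Int) (ks : List Int) (hnd : ks.Nodup) (x : Int) :
    (ks.flatMap (fun v => List.replicate (fear.count v) v)).count x
      = if x ∈ ks then fear.count x else 0 := by
  induction ks with
  | nil => simp
  | cons v t ih =>
      simp only [List.flatMap_cons, List.count_append, List.count_replicate, List.mem_cons]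
      have hnt : t.Nodup := hnd.of_cons
      have hvnt : v ∉ t := by simp [List.nodup_cons] at hnd; exact hnd.1
      rw [ih hnt]
      by_cases hxv : x = v
      · subst hxv
        simp [hvnt]
      · simp [hxv, beq_iff_eq, Ne.symm hxv]

-- the flattened blocks are a permutation of fear
lemma perm_flatMap (fear : List Int) (ks : List Int) (hnd : ks.Nodup)
    (hmem : ∀ x, x ∈ ks ↔ x ∈ fear) :
    (ks.flatMap (fun v => List.replicate (fear.count v) v)).Perm fear := by
  rw [List.perm_iff_count]
  intro x
  rw [count_flatMap_replicate fear ks hnd x]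
  by_cases hx : x ∈ ks
  · simp [hx]
  · have : x ∉ fear := fun h => hx ((hmem x).2 h)
    simp [hx, List.count_eq_zero_of_not_mem this]

-- the flattened blocks are weakly increasing
lemma pairwise_flatMap (fear : List Int) (ks : List Int) (hp : ks.Pairwise (· < ·)) :
    (ks.flatMap (fun v => List.replicate (fear.count v) v)).Pairwise (· ≤ ·) := by
  induction ks with
  | nil => simp
  | cons v t ih =>
      rw [List.flatMap_cons, List.pairwise_append]
      refine ⟨List.pairwise_replicate.2 (Or.inr le_rfl), ih hp.of_cons, ?_⟩
      intro a ha b hb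
      rw [List.eq_of_mem_replicate ha]
      have hbmem := mem_flatMap_replicate (fun v => fear.count v) t b hb
      exact le_of_lt (List.rel_of_pairwise_cons hp hbmem)

-- sorted(fear) is the concatenation of the blocks over the sorted distinct values
lemma sorted_eq_flatMap (fear : List Int) :
    PySem.List.sorted fear (fun x => x) false
      = (PySem.List.sorted (PySem.Set.ofList fear) (fun x => x) false).flatMap
          (fun v => List.replicate (fear.count v) v) := by
  set ks := PySem.List.sorted (PySem.Set.ofList fear) (fun x => x) false with hks
  have hperm : ks.Perm (PySem.Set.ofList fear) := PySem.List.sorted_perm _ _ _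
  have hnd : ks.Nodup := hperm.nodup_iff.2 (PySem.Set.nodup_ofList fear)
  have hmem : ∀ x, x ∈ ks ↔ x ∈ fear := by
    intro x
    rw [hperm.mem_iff, PySem.Set.mem_ofList]
  have hplt : ks.Pairwise (· < ·) := by
    rw [hks]; exact PySem.List.sorted_ofList_pairwise_lt fear
  exact PySem.List.sorted_id_eq_of_perm_of_pairwise _ _
    (perm_flatMap fear ks hnd hmem) (pairwise_flatMap fear ks hplt)

-- ===== VERDICT (by name: the statement is the Claim_ definition above) =====
theorem solution_spec : Claim_equal_solution := by
  intro n fear _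
  unfold Spec_solution solution solution_alt
  show (List.foldl solutionStep (0, 0) (PySem.List.sorted fear (fun x => x) false)).1
      = (List.foldl (solutionAltStep (PySem.Dict.counter fear)) (0, 0)
          (PySem.List.sorted (PySem.Dict.counter fear).keys (fun x => x) false)).1
  rw [PySem.Dict.keys_counter]
  rw [sorted_eq_flatMap fear]
  set ks := PySem.List.sorted (PySem.Set.ofList fear) (fun x => x) false with hks
  have hperm : ks.Perm (PySem.Set.ofList fear) := PySem.List.sorted_perm _ _ _
  have hmem : ∀ x, x ∈ ks ↔ x ∈ fear := by
    intro x; rw [hperm.mem_iff, PySem.Set.mem_ofList]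
  have hplt : ks.Pairwise (· < ·) := by
    rw [hks]; exact PySem.List.sorted_ofList_pairwise_lt fear
  rw [main_fold fear ks 0 0 le_rfl hplt
    (fun v _ => by omega) (fun v hv => List.one_le_count_iff.2 ((hmem v).1 hv))]
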